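-- pv_equiv track=rewrite | github.com/coreanq/kw_condition | kw_condition/utils/kw_util.py | getHogaPrice
-- ===== SOURCE A (Python) =====
-- import math
--
-- def hogaUnitCalc(price,jang):
--     hogaUnit = 1
--     if price < 1000:
--         hogaUnit = 1
--     elif price < 5000:
--         hogaUnit = 5
--     elif price < 10000:
--         hogaUnit = 10
--     elif price < 50000:
--         hogaUnit = 50
--     elif price < 100000 and jang == "kospi":
--         hogaUnit = 100
--     elif price < 500000 and jang == "kospi":
--         hogaUnit = 500
--     elif price >= 500000 and jang == "kospi":
--         hogaUnit = 1000
--     elif price >= 50000 and jang == "kosdaq":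
--         hogaUnit = 100
--
--     return hogaUnit
--
-- def getHogaPrice(currentPrice, hogadifference, jang):
--     hogaPrice = currentPrice
--     hogaunit = hogaUnitCalc(hogaPrice, jang)
--
--     for _ in range(abs(hogadifference)):
--         if hogadifference < 0:
--             minusV = (hogaPrice - 1)
--             hogaunit = hogaUnitCalc(minusV, jang)
--             mot = minusV // hogaunit
--             hogaPrice = mot * hogaunit
--         elif hogadifference > 0:
--             hogaunit = hogaUnitCalc(hogaPrice, jang)
--             hogaPrice = hogaPrice+ hogaunit
--
--     mot = math.ceil(hogaPrice // hogaunit)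
--     hogaPrice = mot * hogaunit
--     return int(hogaPrice)
-- ===== SOURCE B (Python) =====
-- # B: jump across the piecewise-constant tick tiers arithmetically (O(#tiers))
-- # instead of A's one-tick-at-a-time loop (O(|hogadifference|)).
--
-- def _tier(price, jang):
--     # (lower bound or None, upper bound or None, tick unit) of the tier containing price
--     if price < 1000:
--         return (None, 1000, 1)
--     if price < 5000:
--         return (1000, 5000, 5)
--     if price < 10000:
--         return (5000, 10000, 10)
--     if price < 50000:
--         return (10000, 50000, 50)
--     if jang == "kospi":
--         if price < 100000:
--             return (50000, 100000, 100)
--         if price < 500000: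
--             return (100000, 500000, 500)
--         return (500000, None, 1000)
--     if jang == "kosdaq":
--         return (50000, None, 100)
--     return (50000, None, 1)
--
-- def getHogaPrice(currentPrice, hogadifference, jang):
--     p = currentPrice
--     if hogadifference >= 0:
--         rem = hogadifference
--         u = _tier(p, jang)[2]
--         while rem > 0:
--             _, hi, u = _tier(p, jang)
--             if hi is None:
--                 p += rem * u
--                 rem = 0
--             else:
--                 k = -((p - hi) // u)        # ticks until the tier boundary
--                 t = k if k < rem else rem
--                 p += t * u
--                 rem -= t
--         return (p // u) * u
--     else:
--         rem = -hogadifference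
--         while rem > 0:
--             v = p - 1
--             lo, _, u = _tier(v, jang)
--             p1 = (v // u) * u
--             if lo is None:
--                 p = p1 - (rem - 1) * u
--                 rem = 0
--             else:
--                 avail = 1 + (p1 - lo) // u  # ticks available inside this tier
--                 t = avail if avail < rem else rem
--                 p = p1 - (t - 1) * u
--                 rem -= t
--         return p
-- ===== Notes on version B (the rewrite author's own statement) =====
-- stated objective: faster
-- what changed: Replaces A's one-tick-at-a-time loop over abs(hogadifference) with arithmetic jumps across the piecewise-constant tick-unit tiers, moving a whole tier (or the full remainder) per iteration.
import Mathlib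
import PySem

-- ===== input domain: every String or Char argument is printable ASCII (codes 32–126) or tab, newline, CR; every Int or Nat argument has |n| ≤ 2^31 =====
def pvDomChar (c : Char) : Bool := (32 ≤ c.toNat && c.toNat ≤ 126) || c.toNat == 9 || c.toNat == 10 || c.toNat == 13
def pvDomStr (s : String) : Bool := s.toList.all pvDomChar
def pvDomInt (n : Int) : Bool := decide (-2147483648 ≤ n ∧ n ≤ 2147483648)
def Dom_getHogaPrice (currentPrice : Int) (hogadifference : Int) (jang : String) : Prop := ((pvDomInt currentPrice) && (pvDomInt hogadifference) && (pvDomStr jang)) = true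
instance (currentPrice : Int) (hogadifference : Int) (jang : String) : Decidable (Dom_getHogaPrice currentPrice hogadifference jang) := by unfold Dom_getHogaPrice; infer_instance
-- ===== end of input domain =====

-- B replaces A's one-tick-at-a-time loop (O(|hogadifference|) iterations) by arithmetic
-- jumps across the piecewise-constant tick-unit tiers (one loop pass per tier crossed).

-- ===== PORT A =====
def hogaUnitCalc (price : Int) (jang : String) : Int :=
  if price < 1000 then 1
  else if price < 5000 then 5
  else if price < 10000 then 10
  else if price < 50000 then 50
  else if price < 100000 ∧ jang = "kospi" then 100
  else if price < 500000 ∧ jang = "kospi" then 500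
  else if price ≥ 500000 ∧ jang = "kospi" then 1000
  else if price ≥ 50000 ∧ jang = "kosdaq" then 100
  else 1

-- one iteration of A's for-loop body, over the state (hogaPrice, hogaunit)
def pvAStep (hogadifference : Int) (jang : String) (s : Int × Int) : Int × Int :=
  if hogadifference < 0 then
    let minusV := s.1 - 1
    let hogaunit := hogaUnitCalc minusV jang
    (PySem.Int.floordiv minusV hogaunit * hogaunit, hogaunit)
  else if hogadifference > 0 then
    let hogaunit := hogaUnitCalc s.1 jang
    (s.1 + hogaunit, hogaunit)
  else s

def getHogaPrice (currentPrice : Int) (hogadifference : Int) (jang : String) : Int :=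
  -- for _ in range(abs(hogadifference)): the loop index is unused
  let s := (List.range hogadifference.natAbs).foldl
             (fun st _ => pvAStep hogadifference jang st)
             (currentPrice, hogaUnitCalc currentPrice jang)
  -- math.ceil(hogaPrice // hogaunit) of an int is that int, so mot = hogaPrice // hogaunit
  PySem.Int.floordiv s.1 s.2 * s.2

-- ===== PORT B =====
-- (lower bound or none, upper bound or none, tick unit) of the tier containing price
def pvTier (price : Int) (jang : String) : Option Int × Option Int × Int :=
  if price < 1000 then (none, some 1000, 1)
  else if price < 5000 then (some 1000, some 5000, 5)
  else if price < 10000 then (some 5000, some 10000, 10)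
  else if price < 50000 then (some 10000, some 50000, 50)
  else if jang = "kospi" then
    (if price < 100000 then (some 50000, some 100000, 100)
     else if price < 500000 then (some 100000, some 500000, 500)
     else (some 500000, none, 1000))
  else if jang = "kosdaq" then (some 50000, none, 100)
  else (some 50000, none, 1)

-- Source B's ascending while-loop; fuel bounds the pass count (each pass consumes ≥ 1 tick)
def pvAltUp (jang : String) : Nat → Int → Int → Int → Int × Int
  | 0, p, _, u => (p, u)
  | fuel+1, p, rem, u =>
    if rem > 0 then
      let t3 := pvTier p jang
      let u' := t3.2.2
      match t3.2.1 with
      | none => (p + rem * u', u')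
      | some hi =>
        let k := -(PySem.Int.floordiv (p - hi) u')   -- ticks until the tier boundary
        let t := if k < rem then k else rem
        pvAltUp jang fuel (p + t * u') (rem - t) u'
    else (p, u)

-- Source B's descending while-loop; same fuel convention
def pvAltDown (jang : String) : Nat → Int → Int → Int
  | 0, p, _ => p
  | fuel+1, p, rem =>
    if rem > 0 then
      let v := p - 1
      let t3 := pvTier v jang
      let u := t3.2.2
      let p1 := PySem.Int.floordiv v u * u
      match t3.1 with
      | none => p1 - (rem - 1) * u
      | some lo =>
        let avail := 1 + PySem.Int.floordiv (p1 - lo) u  -- ticks available inside this tier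
        let t := if avail < rem then avail else rem
        pvAltDown jang fuel (p1 - (t - 1) * u) (rem - t)
    else p

def getHogaPrice_alt (currentPrice : Int) (hogadifference : Int) (jang : String) : Int :=
  if hogadifference ≥ 0 then
    let s := pvAltUp jang hogadifference.toNat currentPrice hogadifference
               ((pvTier currentPrice jang).2.2)
    PySem.Int.floordiv s.1 s.2 * s.2
  else
    pvAltDown jang (-hogadifference).toNat currentPrice (-hogadifference)

-- ===== PRECONDITION & SPEC =====
def Spec_getHogaPrice (currentPrice : Int) (hogadifference : Int) (jang : String) (out : Int) : Prop := out = getHogaPrice_alt currentPrice hogadifference jang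
instance (currentPrice : Int) (hogadifference : Int) (jang : String) (out : Int) : Decidable (Spec_getHogaPrice currentPrice hogadifference jang out) := by unfold Spec_getHogaPrice; infer_instance

-- ===== CLAIM (what is proved, stated in full; the proofs are below) =====
def Claim_equal_getHogaPrice : Prop := ∀ (currentPrice : Int) (hogadifference : Int) (jang : String), Dom_getHogaPrice currentPrice hogadifference jang → Spec_getHogaPrice currentPrice hogadifference jang (getHogaPrice currentPrice hogadifference jang)

-- ===== LEMMAS AND PROOFS =====

-- mathematical single-tick steps (A's loop body on the price component)
def pvUpStep (jang : String) (p : Int) : Int := p + hogaUnitCalc p jang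
def pvDnStep (jang : String) (p : Int) : Int :=
  PySem.Int.floordiv (p - 1) (hogaUnitCalc (p - 1) jang) * hogaUnitCalc (p - 1) jang

lemma pvFoldlConst {α β : Type} (g : β → β) (l : List α) (s : β) :
    l.foldl (fun st _ => g st) s = g^[l.length] s := by
  induction l generalizing s with
  | nil => rfl
  | cons a t ih => simp [List.foldl_cons, ih, Function.iterate_succ_apply]

lemma pvUnit_pos (p : Int) (jang : String) : 0 < hogaUnitCalc p jang := by
  unfold hogaUnitCalc; split_ifs <;> norm_num

-- pointwise evaluations of hogaUnitCalc on each tier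
lemma pvU1 (q : Int) (jang : String) (h : q < 1000) : hogaUnitCalc q jang = 1 := by
  unfold hogaUnitCalc; split_ifs <;> first | rfl | omega | simp_all
lemma pvU5 (q : Int) (jang : String) (h1 : 1000 ≤ q) (h2 : q < 5000) :
    hogaUnitCalc q jang = 5 := by
  unfold hogaUnitCalc; split_ifs <;> first | rfl | omega | simp_all
lemma pvU10 (q : Int) (jang : String) (h1 : 5000 ≤ q) (h2 : q < 10000) :
    hogaUnitCalc q jang = 10 := by
  unfold hogaUnitCalc; split_ifs <;> first | rfl | omega | simp_all
lemma pvU50 (q : Int) (jang : String) (h1 : 10000 ≤ q) (h2 : q < 50000) :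
    hogaUnitCalc q jang = 50 := by
  unfold hogaUnitCalc; split_ifs <;> first | rfl | omega | simp_all
lemma pvU100k (q : Int) (jang : String) (hk : jang = "kospi") (h1 : 50000 ≤ q)
    (h2 : q < 100000) : hogaUnitCalc q jang = 100 := by
  unfold hogaUnitCalc; split_ifs <;> first | rfl | omega | simp_all
lemma pvU500k (q : Int) (jang : String) (hk : jang = "kospi") (h1 : 100000 ≤ q)
    (h2 : q < 500000) : hogaUnitCalc q jang = 500 := by
  unfold hogaUnitCalc; split_ifs <;> first | rfl | omega | simp_all
lemma pvU1000k (q : Int) (jang : String) (hk : jang = "kospi") (h1 : 500000 ≤ q) :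
    hogaUnitCalc q jang = 1000 := by
  unfold hogaUnitCalc; split_ifs <;> first | rfl | omega | simp_all
lemma pvU100d (q : Int) (jang : String) (hk : jang = "kosdaq") (h1 : 50000 ≤ q) :
    hogaUnitCalc q jang = 100 := by
  unfold hogaUnitCalc; split_ifs <;> first | rfl | omega | simp_all
lemma pvU1o (q : Int) (jang : String) (hk : jang ≠ "kospi") (hkd : jang ≠ "kosdaq")
    (h1 : 50000 ≤ q) : hogaUnitCalc q jang = 1 := by
  unfold hogaUnitCalc; split_ifs <;> first | rfl | omega | simp_all

-- pointwise evaluations of pvTier on each tier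
lemma pvT1 (p : Int) (jang : String) (h : p < 1000) :
    pvTier p jang = (none, some 1000, 1) := by
  unfold pvTier; split_ifs <;> first | rfl | omega | simp_all
lemma pvT2 (p : Int) (jang : String) (h1 : 1000 ≤ p) (h2 : p < 5000) :
    pvTier p jang = (some 1000, some 5000, 5) := by
  unfold pvTier; split_ifs <;> first | rfl | omega | simp_all
lemma pvT3 (p : Int) (jang : String) (h1 : 5000 ≤ p) (h2 : p < 10000) :
    pvTier p jang = (some 5000, some 10000, 10) := by
  unfold pvTier; split_ifs <;> first | rfl | omega | simp_all
lemma pvT4 (p : Int) (jang : String) (h1 : 10000 ≤ p) (h2 : p < 50000) :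
    pvTier p jang = (some 10000, some 50000, 50) := by
  unfold pvTier; split_ifs <;> first | rfl | omega | simp_all
lemma pvT5 (p : Int) (jang : String) (hk : jang = "kospi") (h1 : 50000 ≤ p)
    (h2 : p < 100000) : pvTier p jang = (some 50000, some 100000, 100) := by
  unfold pvTier; split_ifs <;> first | rfl | omega | simp_all
lemma pvT6 (p : Int) (jang : String) (hk : jang = "kospi") (h1 : 100000 ≤ p)
    (h2 : p < 500000) : pvTier p jang = (some 100000, some 500000, 500) := by
  unfold pvTier; split_ifs <;> first | rfl | omega | simp_all
lemma pvT7 (p : Int) (jang : String) (hk : jang = "kospi") (h1 : 500000 ≤ p) :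
    pvTier p jang = (some 500000, none, 1000) := by
  unfold pvTier; split_ifs <;> first | rfl | omega | simp_all
lemma pvT8 (p : Int) (jang : String) (hk : jang = "kosdaq") (h1 : 50000 ≤ p) :
    pvTier p jang = (some 50000, none, 100) := by
  unfold pvTier; split_ifs <;> first | rfl | omega | simp_all
lemma pvT9 (p : Int) (jang : String) (hk : jang ≠ "kospi") (hkd : jang ≠ "kosdaq")
    (h1 : 50000 ≤ p) : pvTier p jang = (some 50000, none, 1) := by
  unfold pvTier; split_ifs <;> first | rfl | omega | simp_all

-- everything the loop proofs need about a tier: its unit is hogaUnitCalc, its bounds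
-- bracket p, its lower bound is a multiple of the unit, and hogaUnitCalc is constant
-- on the whole tier
lemma pvTierFacts (p : Int) (jang : String) :
    (pvTier p jang).2.2 = hogaUnitCalc p jang ∧
    (∀ hi, (pvTier p jang).2.1 = some hi → p < hi) ∧
    (∀ lo, (pvTier p jang).1 = some lo → lo ≤ p ∧ ∃ m : Int, lo = m * (pvTier p jang).2.2) ∧
    (∀ q, ((pvTier p jang).1 = none ∨ ∃ lo, (pvTier p jang).1 = some lo ∧ lo ≤ q) →
      ((pvTier p jang).2.1 = none ∨ ∃ hi, (pvTier p jang).2.1 = some hi ∧ q < hi) →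
      hogaUnitCalc q jang = (pvTier p jang).2.2) := by
  by_cases h1 : p < 1000
  · rw [pvT1 p jang h1]; dsimp only
    refine ⟨(pvU1 p jang h1).symm, ?_, ?_, ?_⟩
    · rintro hi hh; injection hh with hh; omega
    · rintro lo hh; exact absurd hh (by simp)
    · rintro q _ (hh | ⟨hi, hh, hq⟩)
      · exact absurd hh (by simp)
      · injection hh with hh; exact pvU1 q jang (by omega)
  · by_cases h2 : p < 5000
    · rw [pvT2 p jang (by omega) h2]; dsimp only
      refine ⟨(pvU5 p jang (by omega) h2).symm, ?_, ?_, ?_⟩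
      · rintro hi hh; injection hh with hh; omega
      · rintro lo hh; injection hh with hh; exact ⟨by omega, 200, by omega⟩
      · rintro q (hh | ⟨lo, hh, hq⟩) (hh' | ⟨hi, hh', hq'⟩)
        · exact absurd hh (by simp)
        · exact absurd hh (by simp)
        · exact absurd hh' (by simp)
        · injection hh with hh; injection hh' with hh'
          exact pvU5 q jang (by omega) (by omega)
    · by_cases h3 : p < 10000
      · rw [pvT3 p jang (by omega) h3]; dsimp only
        refine ⟨(pvU10 p jang (by omega) h3).symm, ?_, ?_, ?_⟩
        · rintro hi hh; injection hh with hh; omega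
        · rintro lo hh; injection hh with hh; exact ⟨by omega, 500, by omega⟩
        · rintro q (hh | ⟨lo, hh, hq⟩) (hh' | ⟨hi, hh', hq'⟩)
          · exact absurd hh (by simp)
          · exact absurd hh (by simp)
          · exact absurd hh' (by simp)
          · injection hh with hh; injection hh' with hh'
            exact pvU10 q jang (by omega) (by omega)
      · by_cases h4 : p < 50000
        · rw [pvT4 p jang (by omega) h4]; dsimp only
          refine ⟨(pvU50 p jang (by omega) h4).symm, ?_, ?_, ?_⟩
          · rintro hi hh; injection hh with hh; omega
          · rintro lo hh; injection hh with hh; exact ⟨by omega, 200, by omega⟩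
          · rintro q (hh | ⟨lo, hh, hq⟩) (hh' | ⟨hi, hh', hq'⟩)
            · exact absurd hh (by simp)
            · exact absurd hh (by simp)
            · exact absurd hh' (by simp)
            · injection hh with hh; injection hh' with hh'
              exact pvU50 q jang (by omega) (by omega)
        · by_cases hk : jang = "kospi"
          · by_cases h5 : p < 100000
            · rw [pvT5 p jang hk (by omega) h5]; dsimp only
              refine ⟨(pvU100k p jang hk (by omega) h5).symm, ?_, ?_, ?_⟩
              · rintro hi hh; injection hh with hh; omega
              · rintro lo hh; injection hh with hh; exact ⟨by omega, 500, by omega⟩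
              · rintro q (hh | ⟨lo, hh, hq⟩) (hh' | ⟨hi, hh', hq'⟩)
                · exact absurd hh (by simp)
                · exact absurd hh (by simp)
                · exact absurd hh' (by simp)
                · injection hh with hh; injection hh' with hh'
                  exact pvU100k q jang hk (by omega) (by omega)
            · by_cases h6 : p < 500000
              · rw [pvT6 p jang hk (by omega) h6]; dsimp only
                refine ⟨(pvU500k p jang hk (by omega) h6).symm, ?_, ?_, ?_⟩
                · rintro hi hh; injection hh with hh; omega
                · rintro lo hh; injection hh with hh; exact ⟨by omega, 200, by omega⟩
                · rintro q (hh | ⟨lo, hh, hq⟩) (hh' | ⟨hi, hh', hq'⟩)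
                  · exact absurd hh (by simp)
                  · exact absurd hh (by simp)
                  · exact absurd hh' (by simp)
                  · injection hh with hh; injection hh' with hh'
                    exact pvU500k q jang hk (by omega) (by omega)
              · rw [pvT7 p jang hk (by omega)]; dsimp only
                refine ⟨(pvU1000k p jang hk (by omega)).symm, ?_, ?_, ?_⟩
                · rintro hi hh; exact absurd hh (by simp)
                · rintro lo hh; injection hh with hh; exact ⟨by omega, 500, by omega⟩
                · rintro q (hh | ⟨lo, hh, hq⟩) _
                  · exact absurd hh (by simp)
                  · injection hh with hh; exact pvU1000k q jang hk (by omega)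
          · by_cases hkd : jang = "kosdaq"
            · rw [pvT8 p jang hkd (by omega)]; dsimp only
              refine ⟨(pvU100d p jang hkd (by omega)).symm, ?_, ?_, ?_⟩
              · rintro hi hh; exact absurd hh (by simp)
              · rintro lo hh; injection hh with hh; exact ⟨by omega, 500, by omega⟩
              · rintro q (hh | ⟨lo, hh, hq⟩) _
                · exact absurd hh (by simp)
                · injection hh with hh; exact pvU100d q jang hkd (by omega)
            · rw [pvT9 p jang hk hkd (by omega)]; dsimp only
              refine ⟨(pvU1o p jang hk hkd (by omega)).symm, ?_, ?_, ?_⟩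
              · rintro hi hh; exact absurd hh (by simp)
              · rintro lo hh; injection hh with hh; exact ⟨by omega, 50000, by omega⟩
              · rintro q (hh | ⟨lo, hh, hq⟩) _
                · exact absurd hh (by simp)
                · injection hh with hh; exact pvU1o q jang hk hkd (by omega)

lemma pvTier_unit (p : Int) (jang : String) :
    (pvTier p jang).2.2 = hogaUnitCalc p jang := (pvTierFacts p jang).1

lemma pvTier_hi_gt (p : Int) (jang : String) (hi : Int)
    (h : (pvTier p jang).2.1 = some hi) : p < hi := (pvTierFacts p jang).2.1 hi h

lemma pvTier_lo_le (p : Int) (jang : String) (lo : Int)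
    (h : (pvTier p jang).1 = some lo) : lo ≤ p := ((pvTierFacts p jang).2.2.1 lo h).1

lemma pvTier_lo_dvd (p : Int) (jang : String) (lo : Int)
    (h : (pvTier p jang).1 = some lo) : ∃ m : Int, lo = m * (pvTier p jang).2.2 :=
  ((pvTierFacts p jang).2.2.1 lo h).2

-- the tick unit is constant on [p, hi) (resp. on all of [p, ∞) when the tier is topless)
lemma pvStableUp (p q : Int) (jang : String) (hpq : p ≤ q)
    (hhi : (pvTier p jang).2.1 = none ∨ ∃ hi, (pvTier p jang).2.1 = some hi ∧ q < hi) :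
    hogaUnitCalc q jang = (pvTier p jang).2.2 := by
  refine (pvTierFacts p jang).2.2.2 q ?_ hhi
  cases hlo : (pvTier p jang).1 with
  | none => exact Or.inl rfl
  | some lo => exact Or.inr ⟨lo, rfl, le_trans (pvTier_lo_le p jang lo hlo) hpq⟩

-- the tick unit is constant on [lo, p] (resp. on all of (-∞, p] when the tier is bottomless)
lemma pvStableDown (p q : Int) (jang : String) (hqp : q ≤ p)
    (hlo : (pvTier p jang).1 = none ∨ ∃ lo, (pvTier p jang).1 = some lo ∧ lo ≤ q) :
    hogaUnitCalc q jang = (pvTier p jang).2.2 := by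
  refine (pvTierFacts p jang).2.2.2 q hlo ?_
  cases hhi : (pvTier p jang).2.1 with
  | none => exact Or.inl rfl
  | some hi => exact Or.inr ⟨hi, rfl, lt_of_le_of_lt hqp (pvTier_hi_gt p jang hi hhi)⟩

lemma pvFdivMulCancel (c u : Int) (hu : 0 < u) : PySem.Int.floordiv (c * u) u = c := by
  rw [PySem.Int.floordiv_eq_iff_of_pos hu]
  constructor
  · linarith
  · nlinarith

lemma pvFdivPred (c u : Int) (hu : 0 < u) : PySem.Int.floordiv (c * u - 1) u = c - 1 := by
  rw [PySem.Int.floordiv_eq_iff_of_pos hu]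
  constructor
  · nlinarith
  · nlinarith

lemma pvFdivBounds (v u : Int) (hu : 0 < u) :
    PySem.Int.floordiv v u * u ≤ v ∧ v < PySem.Int.floordiv v u * u + u := by
  have h := PySem.Int.floordiv_mul_add_mod v u
  have h1 := PySem.Int.mod_nonneg v hu
  have h2 := PySem.Int.mod_lt v hu
  constructor <;> linarith

-- characterisation of A's iterated loop body, ascending case
lemma pvAIterUp (jang : String) (hd : Int) (h : 0 < hd) (n : Nat) (p u : Int) :
    (pvAStep hd jang)^[n] (p, u) =
      ((pvUpStep jang)^[n] p,
        if n = 0 then u else hogaUnitCalc ((pvUpStep jang)^[n-1] p) jang) := by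
  induction n generalizing p u with
  | zero => simp
  | succ m ih =>
    rw [Function.iterate_succ_apply]
    have hstep : pvAStep hd jang (p, u) = (pvUpStep jang p, hogaUnitCalc p jang) := by
      unfold pvAStep pvUpStep; rw [if_neg (by omega), if_pos h]
    rw [hstep, ih]
    rcases Nat.eq_zero_or_pos m with hm | hm
    · subst hm; simp [pvUpStep]
    · have h1 : (pvUpStep jang)^[m] (pvUpStep jang p) = (pvUpStep jang)^[m+1] p := by
        rw [Function.iterate_succ_apply]
      have h2 : (pvUpStep jang)^[m-1] (pvUpStep jang p) = (pvUpStep jang)^[m] p := by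
        rw [← Function.iterate_succ_apply]; congr 1; omega
      rw [h1, if_neg (by omega), if_neg (by omega), h2]
      norm_num

-- characterisation of A's iterated loop body, descending case
lemma pvAIterDn (jang : String) (hd : Int) (h : hd < 0) (n : Nat) (p u : Int) :
    (pvAStep hd jang)^[n] (p, u) =
      ((pvDnStep jang)^[n] p,
        if n = 0 then u else hogaUnitCalc ((pvDnStep jang)^[n-1] p - 1) jang) := by
  induction n generalizing p u with
  | zero => simp
  | succ m ih =>
    rw [Function.iterate_succ_apply]
    have hstep : pvAStep hd jang (p, u) = (pvDnStep jang p, hogaUnitCalc (p - 1) jang) := by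
      unfold pvAStep pvDnStep; rw [if_pos h]
    rw [hstep, ih]
    rcases Nat.eq_zero_or_pos m with hm | hm
    · subst hm; simp [pvDnStep]
    · have h1 : (pvDnStep jang)^[m] (pvDnStep jang p) = (pvDnStep jang)^[m+1] p := by
        rw [Function.iterate_succ_apply]
      have h2 : (pvDnStep jang)^[m-1] (pvDnStep jang p) = (pvDnStep jang)^[m] p := by
        rw [← Function.iterate_succ_apply]; congr 1; omega
      rw [h1, if_neg (by omega), if_neg (by omega), h2]
      norm_num

-- t in-tier ascending ticks collapse to one addition
lemma pvUpChunk (jang : String) (u : Int) (hu : 0 < u) :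
    ∀ (t : Nat) (p : Int),
      (∀ j : Nat, j < t → hogaUnitCalc (p + (j : Int) * u) jang = u) →
      (pvUpStep jang)^[t] p = p + (t : Int) * u := by
  intro t
  induction t with
  | zero => intro p _; simp
  | succ m ih =>
    intro p hstab
    rw [Function.iterate_succ_apply]
    have h00 := hstab 0 (by omega)
    norm_num at h00
    have h0 : pvUpStep jang p = p + u := by unfold pvUpStep; rw [h00]
    have h1 : (pvUpStep jang)^[m] (p + u) = (p + u) + (m : Int) * u := by
      refine ih (p + u) (fun j hj => ?_)
      have h2 := hstab (j + 1) (by omega)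
      push_cast at h2 ⊢
      rw [show p + u + (j : Int) * u = p + ((j : Int) + 1) * u by ring]
      exact h2
    rw [h0, h1]; push_cast; ring

-- t in-tier descending ticks from an aligned price collapse to one subtraction
lemma pvDnChunkAligned (jang : String) (u : Int) (hu : 0 < u) :
    ∀ (t : Nat) (c : Int),
      (∀ j : Nat, j < t → hogaUnitCalc (c * u - (j : Int) * u - 1) jang = u) →
      (pvDnStep jang)^[t] (c * u) = (c - (t : Int)) * u := by
  intro t
  induction t with
  | zero => intro c _; simp
  | succ m ih =>
    intro c hstab
    rw [Function.iterate_succ_apply]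
    have h00 := hstab 0 (by omega)
    norm_num at h00
    have h0 : pvDnStep jang (c * u) = (c - 1) * u := by
      unfold pvDnStep
      rw [h00, pvFdivPred c u hu]
    have h1 : (pvDnStep jang)^[m] ((c - 1) * u) = ((c - 1) - (m : Int)) * u := by
      refine ih (c - 1) (fun j hj => ?_)
      have h2 := hstab (j + 1) (by omega)
      push_cast at h2 ⊢
      rw [show (c - 1) * u - (j : Int) * u - 1 = c * u - ((j : Int) + 1) * u - 1 by ring]
      exact h2
    rw [h0, h1]; push_cast; ring

-- B's ascending loop computes the iterated single-tick step (plus the last tick unit)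
lemma pvAltUpEq (jang : String) :
    ∀ (fuel : Nat) (p rem u : Int), 0 ≤ rem → rem ≤ (fuel : Int) →
      pvAltUp jang fuel p rem u =
        ((pvUpStep jang)^[rem.toNat] p,
          if rem = 0 then u
          else hogaUnitCalc ((pvUpStep jang)^[rem.toNat - 1] p) jang) := by
  intro fuel
  induction fuel with
  | zero =>
    intro p rem u h0 h1
    have : rem = 0 := by omega
    subst this
    simp [pvAltUp]
  | succ fuel ih =>
    intro p rem u h0 h1
    by_cases hr : rem = 0
    · subst hr; simp [pvAltUp]
    · have hrpos : 0 < rem := by omega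
      have hu'unit : (pvTier p jang).2.2 = hogaUnitCalc p jang := pvTier_unit p jang
      have hupos : 0 < (pvTier p jang).2.2 := hu'unit ▸ pvUnit_pos p jang
      rw [show pvAltUp jang (fuel+1) p rem u =
          (match (pvTier p jang).2.1 with
           | none => (p + rem * (pvTier p jang).2.2, (pvTier p jang).2.2)
           | some hi =>
             let k := -(PySem.Int.floordiv (p - hi) ((pvTier p jang).2.2))
             let t := if k < rem then k else rem
             pvAltUp jang fuel (p + t * (pvTier p jang).2.2) (rem - t) ((pvTier p jang).2.2))
          from by rw [pvAltUp]; rw [if_pos hrpos]]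
      set u' := (pvTier p jang).2.2 with hu'def
      cases hhi : (pvTier p jang).2.1 with
      | none =>
        have hall : ∀ j : Nat, (j : Int) < rem → hogaUnitCalc (p + (j:Int) * u') jang = u' := by
          intro j hj
          exact pvStableUp p (p + (j:Int)*u') jang (by linarith [mul_nonneg (Int.natCast_nonneg j) (le_of_lt hupos)]) (Or.inl hhi)
        have hc1 : (pvUpStep jang)^[rem.toNat] p = p + rem * u' := by
          rw [pvUpChunk jang u' hupos rem.toNat p (fun j hj => hall j (by omega))]
          congr 1; congr 1; omega
        have hc2 : (pvUpStep jang)^[rem.toNat - 1] p = p + (rem - 1) * u' := by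
          rw [pvUpChunk jang u' hupos (rem.toNat - 1) p (fun j hj => hall j (by omega))]
          congr 1; congr 1; omega
        rw [if_neg hr, hc1, hc2]
        refine Prod.ext rfl ?_
        show u' = hogaUnitCalc (p + (rem - 1) * u') jang
        exact (pvStableUp p _ jang (by nlinarith) (Or.inl hhi)).symm
      | some hi =>
        dsimp only
        have hphi : p < hi := pvTier_hi_gt p jang hi hhi
        set k := -(PySem.Int.floordiv (p - hi) u') with hkdef
        have hkb : (k - 1) * u' < hi - p ∧ hi - p ≤ k * u' := by
          have := (PySem.Int.neg_floordiv_neg_eq_iff_of_pos (a := hi - p) (b := u') (q := k) hupos).mp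
          rw [show -(hi - p) = p - hi by ring] at this
          exact this rfl
        have hk1 : 1 ≤ k := by nlinarith [hkb.2]
        set t := if k < rem then k else rem with htdef
        have ht : 1 ≤ t ∧ t ≤ rem ∧ t ≤ k := by
          rw [htdef]; split_ifs <;> omega
        have hstab : ∀ j : Nat, (j : Int) < t → hogaUnitCalc (p + (j:Int) * u') jang = u' := by
          intro j hj
          refine pvStableUp p _ jang (by linarith [mul_nonneg (Int.natCast_nonneg j) (le_of_lt hupos)]) (Or.inr ⟨hi, hhi, ?_⟩)
          have hj1 : (j : Int) ≤ k - 1 := by omega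
          nlinarith [hkb.1]
        have hchunk : ∀ s : Nat, (s : Int) ≤ t → (pvUpStep jang)^[s] p = p + (s:Int) * u' := by
          intro s hs
          exact pvUpChunk jang u' hupos s p (fun j hj => hstab j (by push_cast; omega))
        have hrec := ih (p + t * u') (rem - t) u' (by omega) (by push_cast at h1 ⊢; omega)
        rw [hrec]
        have hsplit : rem.toNat = (rem - t).toNat + t.toNat := by omega
        have hfst : (pvUpStep jang)^[rem.toNat] p
            = (pvUpStep jang)^[(rem - t).toNat] (p + t * u') := by
          rw [hsplit, Function.iterate_add_apply]
          congr 1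
          rw [hchunk t.toNat (by omega)]
          congr 1; congr 1; omega
        rw [if_neg hr]
        refine Prod.ext ?_ ?_
        · show (pvUpStep jang)^[(rem - t).toNat] (p + t * u') = (pvUpStep jang)^[rem.toNat] p
          rw [hfst]
        · by_cases hrt : rem - t = 0
          · rw [if_pos hrt]
            have hlast : (pvUpStep jang)^[rem.toNat - 1] p = p + (rem - 1) * u' := by
              rw [hchunk (rem.toNat - 1) (by omega),
                show (((rem.toNat - 1 : Nat)) : Int) = rem - 1 by omega]
            have h9 := hstab ((rem - 1).toNat) (by omega)
            rw [show (((rem - 1).toNat : Nat) : Int) = rem - 1 by omega] at h9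
            show u' = hogaUnitCalc ((pvUpStep jang)^[rem.toNat - 1] p) jang
            rw [hlast]
            exact h9.symm
          · rw [if_neg hrt]
            show hogaUnitCalc ((pvUpStep jang)^[(rem - t).toNat - 1] (p + t * u')) jang
                = hogaUnitCalc ((pvUpStep jang)^[rem.toNat - 1] p) jang
            congr 1
            have : (pvUpStep jang)^[(rem - t).toNat - 1] (p + t * u')
                = (pvUpStep jang)^[(rem - t).toNat - 1] ((pvUpStep jang)^[t.toNat] p) := by
              congr 1
              rw [hchunk t.toNat (by omega)]
              congr 1; congr 1; omega
            rw [this, ← Function.iterate_add_apply]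
            congr 1; omega

-- B's descending loop computes the iterated single-tick step
lemma pvAltDownEq (jang : String) :
    ∀ (fuel : Nat) (p rem : Int), 0 ≤ rem → rem ≤ (fuel : Int) →
      pvAltDown jang fuel p rem = (pvDnStep jang)^[rem.toNat] p := by
  intro fuel
  induction fuel with
  | zero =>
    intro p rem h0 h1
    have : rem = 0 := by omega
    subst this
    simp [pvAltDown]
  | succ fuel ih =>
    intro p rem h0 h1
    by_cases hr : rem = 0
    · subst hr; simp [pvAltDown]
    · have hrpos : 0 < rem := by omega
      have hu : (pvTier (p-1) jang).2.2 = hogaUnitCalc (p-1) jang := pvTier_unit (p-1) jang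
      have hupos : 0 < (pvTier (p-1) jang).2.2 := hu ▸ pvUnit_pos (p-1) jang
      set u := (pvTier (p-1) jang).2.2 with hudef
      set c := PySem.Int.floordiv (p-1) u with hcdef
      have hb := pvFdivBounds (p-1) u hupos
      have hdn1 : pvDnStep jang p = c * u := by
        unfold pvDnStep; rw [← hu]
      rw [show pvAltDown jang (fuel+1) p rem =
          (match (pvTier (p-1) jang).1 with
           | none => c * u - (rem - 1) * u
           | some lo =>
             let avail := 1 + PySem.Int.floordiv (c * u - lo) u
             let t := if avail < rem then avail else rem
             pvAltDown jang fuel (c * u - (t - 1) * u) (rem - t))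
          from by rw [pvAltDown]; rw [if_pos hrpos]]
      have hiter : (pvDnStep jang)^[rem.toNat] p
          = (pvDnStep jang)^[rem.toNat - 1] (c * u) := by
        rw [show rem.toNat = (rem.toNat - 1) + 1 by omega, Function.iterate_add_apply]
        simp [hdn1]
      cases hlo : (pvTier (p-1) jang).1 with
      | none =>
        have hall : ∀ j : Nat, (j : Int) < rem - 1 →
            hogaUnitCalc (c * u - (j:Int) * u - 1) jang = u := by
          intro j hj
          refine pvStableDown (p-1) _ jang (by nlinarith [hb.1]) (Or.inl hlo)
        rw [hiter, pvDnChunkAligned jang u hupos (rem.toNat - 1) c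
            (fun j hj => hall j (by omega))]
        have : ((rem.toNat - 1 : Nat) : Int) = rem - 1 := by omega
        rw [this]; ring
      | some lo =>
        dsimp only
        have hlov : lo ≤ p - 1 := pvTier_lo_le (p-1) jang lo hlo
        obtain ⟨m, hm⟩ := pvTier_lo_dvd (p-1) jang lo hlo
        rw [← hudef] at hm
        have hmc : m ≤ c := by
          have h1' : m * u ≤ p - 1 := hm ▸ hlov
          have h2' : p - 1 < (c + 1) * u := by nlinarith [hb.2]
          nlinarith
        have havail : 1 + PySem.Int.floordiv (c * u - lo) u = 1 + (c - m) := by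
          rw [hm, show c * u - m * u = (c - m) * u by ring, pvFdivMulCancel _ u hupos]
        rw [havail]
        set t := if 1 + (c - m) < rem then 1 + (c - m) else rem with htdef
        have ht : 1 ≤ t ∧ t ≤ rem ∧ t ≤ 1 + (c - m) := by
          rw [htdef]; split_ifs <;> omega
        have hstab : ∀ j : Nat, (j : Int) < t - 1 →
            hogaUnitCalc (c * u - (j:Int) * u - 1) jang = u := by
          intro j hj
          refine pvStableDown (p-1) _ jang (by nlinarith [hb.1]) (Or.inr ⟨lo, hlo, ?_⟩)
          have : (j : Int) ≤ c - m - 1 := by omega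
          nlinarith [hm]
        have hchunk : (pvDnStep jang)^[(t-1).toNat] (c * u) = (c - (t - 1)) * u := by
          rw [pvDnChunkAligned jang u hupos (t-1).toNat c
              (fun j hj => hstab j (by omega))]
          congr 1; omega
        have hrec := ih (c * u - (t - 1) * u) (rem - t) (by omega)
            (by push_cast at h1 ⊢; omega)
        rw [hrec, hiter]
        have hsplit : rem.toNat - 1 = (rem - t).toNat + (t - 1).toNat := by omega
        rw [hsplit, Function.iterate_add_apply, hchunk]
        congr 1; ring

-- ===== VERDICT (by name: the statement is the Claim_ definition above) =====
theorem getHogaPrice_spec : Claim_equal_getHogaPrice := by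
  intro p n jang _
  unfold Spec_getHogaPrice getHogaPrice getHogaPrice_alt
  rcases lt_trichotomy n 0 with hn | hn | hn
  · -- descending
    rw [if_neg (by omega)]
    rw [pvFoldlConst, List.length_range]
    rw [pvAIterDn jang n hn n.natAbs p (hogaUnitCalc p jang)]
    rw [pvAltDownEq jang (-n).toNat p (-n) (by omega) (by omega)]
    have hm : (-n).toNat = n.natAbs := by omega
    rw [hm, if_neg (by omega)]
    have hsucc : (pvDnStep jang)^[n.natAbs] p
        = pvDnStep jang ((pvDnStep jang)^[n.natAbs - 1] p) := by
      conv_lhs => rw [show n.natAbs = (n.natAbs - 1) + 1 by omega]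
      rw [Function.iterate_succ_apply']
    rw [hsucc]
    dsimp only
    unfold pvDnStep
    rw [pvFdivMulCancel _ _ (pvUnit_pos _ _)]
  · -- zero
    subst hn
    rw [if_pos (by omega)]
    simp [pvAltUp, pvTier_unit]
  · -- ascending
    rw [if_pos (by omega)]
    rw [pvFoldlConst, List.length_range]
    rw [pvAIterUp jang n hn n.natAbs p (hogaUnitCalc p jang)]
    rw [pvAltUpEq jang n.toNat p n ((pvTier p jang).2.2) (by omega) (by omega)]
    have hm : n.natAbs = n.toNat := by omega
    rw [hm, if_neg (by omega), if_neg (by omega)]
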